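-- pv_equiv track=rewrite | github.com/lee-ji-an/Algorithm_Study | Programmers/week47/12900/dltmdrl1244/12900.py | solution
-- ===== SOURCE A (Python) =====
-- def solution(n):
--     answer = 0
--     dp = [0 for _ in range(60001)]
--     dp[1] = 1
--     dp[2] = 2
--
--     for i in range(3, n+1):
--         dp[i] = (dp[i-1] + dp[i-2]) % 1000000007
--
--     return dp[n]
-- ===== SOURCE B (Python) =====
-- def solution(n):
--     # Fast doubling on the Fibonacci recurrence: dp[n] = F(n+1) with F(1)=F(2)=1,
--     # computed mod 1e9+7 in O(log n); 0 tilings for n <= 0.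
--     if n <= 0:
--         return 0
--     MOD = 1000000007
--
--     def fib_pair(k):
--         # returns (F(k) % MOD, F(k+1) % MOD)
--         if k == 0:
--             return (0, 1)
--         a, b = fib_pair(k // 2)
--         c = (a * (2 * b - a)) % MOD
--         d = (a * a + b * b) % MOD
--         if k % 2:
--             return (d, (c + d) % MOD)
--         return (c, d)
--
--     return fib_pair(n + 1)[0]
-- ===== Notes on version B (the rewrite author's own statement) =====
-- stated objective: faster
-- what changed: Replaces the linear DP array of 60001 cells with fast-doubling Fibonacci (dp[n] = F(n+1) mod 1e9+7) computed recursively in O(log n), returning 0 for n <= 0.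
-- intended difference: On n = -60000 and n = -59999 A returns 1 and 2 only because the negative index wraps around to dp[1] and dp[2]; B returns 0, the intended count of tilings for a negative length, like every other negative n. — e.g. on solution(-60000): A returns 1, B returns 0
import Mathlib
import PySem

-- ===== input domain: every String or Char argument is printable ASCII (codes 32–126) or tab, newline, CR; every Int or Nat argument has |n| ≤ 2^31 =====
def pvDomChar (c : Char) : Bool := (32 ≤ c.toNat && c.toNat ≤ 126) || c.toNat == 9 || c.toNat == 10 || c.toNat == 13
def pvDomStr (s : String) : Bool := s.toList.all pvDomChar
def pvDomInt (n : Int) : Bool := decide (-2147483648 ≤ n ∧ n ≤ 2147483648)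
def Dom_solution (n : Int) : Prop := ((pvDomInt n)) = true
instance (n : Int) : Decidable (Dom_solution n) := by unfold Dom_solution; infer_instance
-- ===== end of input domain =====

set_option maxRecDepth 20000

-- B replaces the O(n) DP array with fast-doubling Fibonacci mod 1e9+7 (asymptotically faster).

-- ===== PORT A =====
-- dp = [0]*60001; dp[1] = 1; dp[2] = 2
def aInit : List Int :=
  PySem.List.pySetD (PySem.List.pySetD (List.replicate 60001 (0 : Int)) 1 1) 2 2

-- the loop body: dp[i] = (dp[i-1] + dp[i-2]) % 1000000007  (indices always in range under Pre_)
def aStep (l : List Int) (i : Int) : List Int :=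
  PySem.List.pySetD l i
    (PySem.Int.mod (PySem.List.pyGetD l (i - 1) 0 + PySem.List.pyGetD l (i - 2) 0) 1000000007)

def solution (n : Int) : Int :=
  let dp := (PySem.List.pyRange 3 (n + 1) 1).foldl aStep aInit
  PySem.List.pyGetD dp n 0    -- return dp[n]  (negative n indexes from the end, as in Python)

-- ===== PORT B =====
-- fib_pair k = (F(k) % MOD, F(k+1) % MOD) by fast doubling (Source B's inner function)
def fibPair : Nat → Int × Int
  | 0 => (0, 1)
  | (k + 1) =>
    let p := fibPair ((k + 1) / 2)
    let a := p.1
    let b := p.2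
    let c := PySem.Int.mod (a * (2 * b - a)) 1000000007
    let d := PySem.Int.mod (a * a + b * b) 1000000007
    if (k + 1) % 2 = 1 then (d, PySem.Int.mod (c + d) 1000000007) else (c, d)
decreasing_by omega

def solution_alt (n : Int) : Int :=
  if n ≤ 0 then 0
  else (fibPair (n + 1).toNat).1   -- n ≥ 1, so .toNat is exact

-- ===== PRECONDITION & SPEC =====
-- Pre_ excludes exactly the inputs where A raises IndexError: n > 60000 (the loop writes past
-- the 60001-cell array) and n < -60001 (the negative return index is out of range).
def Pre_solution (n : Int) : Prop := -60001 ≤ n ∧ n ≤ 60000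
instance (n : Int) : Decidable (Pre_solution n) := by unfold Pre_solution; infer_instance
def pvWitness_solution : Int := (10)

-- On n = -60000 and n = -59999 A returns 1 and 2 only because the negative index wraps around to
-- dp[1] and dp[2]; B returns 0, the intended count of tilings for a negative length, like every other negative n.
def D_solution (n : Int) : Prop := n = -60000 ∨ n = -59999
instance (n : Int) : Decidable (D_solution n) := by unfold D_solution; infer_instance

def Spec_solution (n : Int) (out : Int) : Prop := ¬ D_solution n → out = solution_alt n
instance (n : Int) (out : Int) : Decidable (Spec_solution n out) := by unfold Spec_solution; infer_instance

def pvDiffWitness_solution : Int := (-60000)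
def pvDiffWitnessOut_solution : Int × Int := (1, 0)

-- ===== CLAIM (what is proved, stated in full; the proofs are below) =====
def Claim_unchanged_solution : Prop := ∀ (n : Int), Dom_solution n → Pre_solution n → Spec_solution n (solution n)
def Claim_changed_solution : Prop := Dom_solution (pvDiffWitness_solution) ∧ Pre_solution (pvDiffWitness_solution) ∧ D_solution (pvDiffWitness_solution) ∧ solution (pvDiffWitness_solution) = pvDiffWitnessOut_solution.1 ∧ solution_alt (pvDiffWitness_solution) = pvDiffWitnessOut_solution.2 ∧ pvDiffWitnessOut_solution.1 ≠ pvDiffWitnessOut_solution.2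
def Claim_exact_solution : Prop := ∀ (n : Int), Dom_solution n → Pre_solution n → D_solution n → solution n ≠ solution_alt n

-- ===== LEMMAS AND PROOFS =====

-- the DP recurrence A computes: g j = dp[j]
def g : Nat → Int
  | 0 => 0
  | 1 => 1
  | 2 => 2
  | (k + 3) => PySem.Int.mod (g (k + 2) + g (k + 1)) 1000000007

theorem aInit_eq : aInit = ((List.replicate 60001 (0:Int)).set 1 1).set 2 2 := by
  rw [aInit, PySem.List.pySetD_of_nonneg _ _ (by norm_num), PySem.List.pySetD_of_nonneg _ _ (by norm_num)]
  rfl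

theorem aInit_length : aInit.length = 60001 := by
  rw [aInit_eq, List.length_set, List.length_set, List.length_replicate]

theorem aInit_getD (j : Nat) (hj : j < 60001) :
    aInit.getD j 0 = if j ≤ 2 then g j else 0 := by
  rw [aInit_eq, List.getD_eq_getElem?_getD, List.getElem?_set, List.getElem?_set,
      List.getElem?_replicate]
  simp only [List.length_set, List.length_replicate]
  rcases Nat.lt_or_ge j 3 with h | h
  · interval_cases j <;> simp [g]
  · have hn2 : ¬ (j ≤ 2) := by omega
    have h2 : ¬ ((2:Nat) = j) := by omega
    have h1 : ¬ ((1:Nat) = j) := by omega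
    simp [hn2, h2, h1, hj]

theorem aInit_getElem (j : Nat) (hj : j < aInit.length) :
    aInit[j] = if j ≤ 2 then g j else 0 := by
  rw [← List.getD_eq_getElem aInit 0 hj]
  exact aInit_getD j (by rw [aInit_length] at hj; omega)

theorem dp_invariant (t : Nat) (ht : t ≤ 59998) :
    ((PySem.List.pyRange 3 (3 + (t : Int)) 1).foldl aStep aInit).length = 60001 ∧
    ∀ j : Nat, j < 60001 →
      ((PySem.List.pyRange 3 (3 + (t : Int)) 1).foldl aStep aInit).getD j 0 =
        (if j ≤ 2 + t then g j else 0) := by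
  induction t with
  | zero =>
    rw [show (3 + ((0:Nat) : Int)) = 3 by norm_num, PySem.List.pyRange_one_eq_nil le_rfl,
        List.foldl_nil]
    exact ⟨aInit_length, fun j hj => aInit_getD j hj⟩
  | succ t ih =>
    have ih := ih (by omega)
    obtain ⟨hlen, hval⟩ := ih
    set L := (PySem.List.pyRange 3 (3 + (t : Int)) 1).foldl aStep aInit with hL
    have hrange : PySem.List.pyRange 3 (3 + ((t+1 : Nat) : Int)) 1
        = PySem.List.pyRange 3 (3 + (t : Int)) 1 ++ [3 + (t : Int)] := by
      have := PySem.List.pyRange_one_succ_right (a := 3) (b := 3 + (t : Int)) (by omega)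
      rw [show (3 + ((t+1 : Nat) : Int)) = 3 + (t : Int) + 1 by push_cast; ring]
      exact this
    rw [hrange, List.foldl_append]
    simp only [List.foldl_cons, List.foldl_nil]
    have hi1 : (3 + (t : Int)) - 1 = ((t + 2 : Nat) : Int) := by push_cast; ring
    have hi2 : (3 + (t : Int)) - 2 = ((t + 1 : Nat) : Int) := by push_cast; ring
    have hi0 : (3 + (t : Int)) = ((t + 3 : Nat) : Int) := by push_cast; ring
    have hstep : aStep L (3 + (t : Int)) = L.set (t + 3) (g (t + 3)) := by
      rw [aStep, hi1, hi2, hi0, PySem.List.pySetD_natCast, PySem.List.pyGetD_natCast,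
          PySem.List.pyGetD_natCast]
      have e1 : L.getD (t + 2) 0 = g (t + 2) := by
        rw [hval (t + 2) (by omega)]; simp [show t + 2 ≤ 2 + t by omega]
      have e2 : L.getD (t + 1) 0 = g (t + 1) := by
        rw [hval (t + 1) (by omega)]; simp [show t + 1 ≤ 2 + t by omega]
      rw [e1, e2]
      rfl
    rw [hstep]
    constructor
    · simpa using hlen
    · intro j hj
      rw [List.getD_eq_getElem?_getD, List.getElem?_set]
      rcases eq_or_ne j (t + 3) with rfl | hne
      · simp [hlen, hj, show t + 3 ≤ 2 + (t + 1) by omega]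
      · rw [if_neg (by omega), ← List.getD_eq_getElem?_getD, hval j hj]
        have : (j ≤ 2 + t) ↔ (j ≤ 2 + (t + 1)) := by omega
        simp [this]

theorem fibPair_eq (k : Nat) :
    fibPair k = ((Nat.fib k : Int) % 1000000007, (Nat.fib (k + 1) : Int) % 1000000007) := by
  induction k using Nat.strong_induction_on with
  | _ k ih =>
    match k with
    | 0 => simp only [fibPair]; norm_num [Nat.fib]
    | (k + 1) =>
      rw [fibPair]
      set m := (k + 1) / 2 with hm
      have ihm := ih m (by omega)
      rw [ihm]
      simp only
      set P : Int := 1000000007 with hP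
      have hPpos : (0:Int) < P := by norm_num [hP]
      set a : Int := (Nat.fib m : Int) % P with ha
      set b : Int := (Nat.fib (m + 1) : Int) % P with hb
      have hma : a ≡ (Nat.fib m : Int) [ZMOD P] := Int.emod_emod_of_dvd _ dvd_rfl
      have hmb : b ≡ (Nat.fib (m + 1) : Int) [ZMOD P] := Int.emod_emod_of_dvd _ dvd_rfl
      have hle : Nat.fib m ≤ 2 * Nat.fib (m + 1) :=
        le_trans (Nat.fib_le_fib_succ) (by omega)
      have hc2 : ((Nat.fib (2 * m) : Int)) =
          (Nat.fib m : Int) * (2 * (Nat.fib (m + 1) : Int) - (Nat.fib m : Int)) := by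
        rw [Nat.fib_two_mul]
        push_cast [Nat.cast_sub hle]
        ring
      have hd2 : ((Nat.fib (2 * m + 1) : Int)) =
          (Nat.fib m : Int) * (Nat.fib m : Int) +
          (Nat.fib (m + 1) : Int) * (Nat.fib (m + 1) : Int) := by
        rw [Nat.fib_two_mul_add_one]
        push_cast
        ring
      have hcmod : PySem.Int.mod (a * (2 * b - a)) P = (Nat.fib (2 * m) : Int) % P := by
        rw [PySem.Int.mod_eq_emod_of_pos hPpos, hc2]
        exact (hma.mul ((hmb.mul_left 2).sub hma))
      have hdmod : PySem.Int.mod (a * a + b * b) P = (Nat.fib (2 * m + 1) : Int) % P := by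
        rw [PySem.Int.mod_eq_emod_of_pos hPpos, hd2]
        exact ((hma.mul hma).add (hmb.mul hmb))
      rcases Nat.even_or_odd (k + 1) with he | ho
      · obtain ⟨w, hw⟩ := he
        have h2 : k + 1 = 2 * m := by omega
        have hpar : ¬ ((k + 1) % 2 = 1) := by omega
        rw [if_neg hpar, hcmod, hdmod, h2]
      · have h2 : k + 1 = 2 * m + 1 := by
          rcases ho with ⟨w, hw⟩
          omega
        have hpar : (k + 1) % 2 = 1 := by omega
        rw [if_pos hpar, hcmod, hdmod, h2]
        refine Prod.ext rfl ?_
        simp only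
        rw [PySem.Int.mod_eq_emod_of_pos hPpos]
        have hsum : ((Nat.fib (2 * m + 1 + 1) : Int)) =
            (Nat.fib (2 * m) : Int) + (Nat.fib (2 * m + 1) : Int) := by
          rw [show 2 * m + 1 + 1 = (2 * m) + 2 by ring, Nat.fib_add_two]
          push_cast
          ring
        rw [hsum]
        have h1 : ((Nat.fib (2 * m) : Int) % P) ≡ (Nat.fib (2 * m) : Int) [ZMOD P] :=
          Int.emod_emod_of_dvd _ dvd_rfl
        have h2' : ((Nat.fib (2 * m + 1) : Int) % P) ≡ (Nat.fib (2 * m + 1) : Int) [ZMOD P] :=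
          Int.emod_emod_of_dvd _ dvd_rfl
        exact h1.add h2'

theorem g_eq_fib (n : Nat) (hn : 1 ≤ n) :
    g n = (Nat.fib (n + 1) : Int) % 1000000007 := by
  induction n using Nat.strong_induction_on with
  | _ n ih =>
    match n with
    | 1 => decide
    | 2 => decide
    | (k + 3) =>
      have i1 := ih (k + 2) (by omega) (by omega)
      have i2 := ih (k + 1) (by omega) (by omega)
      rw [g, i1, i2, PySem.Int.mod_eq_emod_of_pos (by norm_num)]
      have hsum : ((Nat.fib (k + 3 + 1) : Int)) =
          (Nat.fib (k + 2 + 1) : Int) + (Nat.fib (k + 1 + 1) : Int) := by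
        rw [show k + 3 + 1 = (k + 2) + 2 by ring, Nat.fib_add_two]
        push_cast
        ring
      rw [hsum]
      have h1 : ((Nat.fib (k + 2 + 1) : Int) % 1000000007) ≡ (Nat.fib (k + 2 + 1) : Int) [ZMOD (1000000007:Int)] :=
        Int.emod_emod_of_dvd _ dvd_rfl
      have h2' : ((Nat.fib (k + 1 + 1) : Int) % 1000000007) ≡ (Nat.fib (k + 1 + 1) : Int) [ZMOD (1000000007:Int)] :=
        Int.emod_emod_of_dvd _ dvd_rfl
      exact h1.add h2'

theorem loop_nil (n : Int) (h : n ≤ 2) :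
    (PySem.List.pyRange 3 (n + 1) 1).foldl aStep aInit = aInit := by
  rw [PySem.List.pyRange_one_eq_nil (by omega), List.foldl_nil]

theorem solution_pos (m : Nat) (h1 : 1 ≤ m) (h2 : m ≤ 60000) :
    solution (m : Int) = g m := by
  rcases Nat.lt_or_ge m 2 with hm | hm
  · have : m = 1 := by omega
    subst this
    rw [solution]
    rw [show (((1:Nat):Int)) = (1:Int) from by norm_num]
    rw [loop_nil 1 (by norm_num)]
    rw [show (1:Int) = (((1:Nat):Int)) from by norm_num, PySem.List.pyGetD_natCast]
    rw [aInit_getD 1 (by omega), if_pos (by omega : (1:Nat) ≤ 2)]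
  · have ht : m - 2 ≤ 59998 := by omega
    obtain ⟨_, hval⟩ := dp_invariant (m - 2) ht
    have hcast : (m : Int) + 1 = 3 + ((m - 2 : Nat) : Int) := by omega
    rw [solution]
    rw [hcast, PySem.List.pyGetD_natCast, hval m (by omega), if_pos (show m ≤ 2 + (m - 2) by omega)]

theorem solution_neg (n : Int) (h1 : -60001 ≤ n) (h2 : n ≤ 0) :
    solution n = if (60001 + n).toNat ≤ 2 then g (60001 + n).toNat else 0 := by
  rw [solution]
  rw [loop_nil n (by omega)]
  rcases eq_or_lt_of_le h2 with rfl | hneg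
  · rw [PySem.List.pyGetD_zero, aInit_getD 0 (by omega), if_pos (by omega : (0:Nat) ≤ 2),
        if_neg (by omega : ¬ ((60001 + (0:Int)).toNat ≤ 2))]
    rfl
  · have hk : n = -(((-n).toNat : Nat) : Int) := by omega
    rw [hk, PySem.List.pyGetD_neg_natCast _ _ _ (by omega) (by rw [aInit_length]; omega)]
    rw [aInit_getElem,
        show aInit.length - (-n).toNat = (60001 + -(((-n).toNat : Nat) : Int)).toNat by
          rw [aInit_length]; omega]

theorem solution_alt_pos (m : Nat) (h1 : 1 ≤ m) :
    solution_alt (m : Int) = (Nat.fib (m + 1) : Int) % 1000000007 := by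
  rw [solution_alt, if_neg (by omega)]
  rw [show ((m : Int) + 1).toNat = m + 1 by omega, fibPair_eq]

-- ===== VERDICT (by name: the statement is the Claim_ definition above) =====
theorem solution_spec : Claim_unchanged_solution := by
  intro n _ hpre hnd
  obtain ⟨hlo, hhi⟩ := hpre
  rcases (by omega : n ≤ 0 ∨ 0 < n) with hle | hpos
  · rw [solution_neg n hlo hle, solution_alt, if_pos hle]
    have hne : n ≠ -60000 ∧ n ≠ -59999 := by
      constructor <;> intro h <;> exact hnd (by unfold D_solution; tauto)
    by_cases hc : (60001 + n).toNat ≤ 2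
    · have h0 : (60001 + n).toNat = 0 := by omega
      rw [if_pos hc, h0]
      rfl
    · rw [if_neg hc]
  · have hm : n = ((n.toNat : Nat) : Int) := by omega
    rw [hm, solution_pos n.toNat (by omega) (by omega),
        solution_alt_pos n.toNat (by omega), g_eq_fib n.toNat (by omega)]

theorem solution_changed : Claim_changed_solution := by
  unfold Claim_changed_solution
  refine ⟨by decide, by norm_num [Pre_solution, pvDiffWitness_solution],
    Or.inl rfl, ?_, by norm_num [solution_alt, pvDiffWitness_solution, pvDiffWitnessOut_solution],
    by norm_num [pvDiffWitnessOut_solution]⟩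
  show solution (-60000) = 1
  rw [solution_neg (-60000) (by norm_num) (by norm_num),
      show ((60001 : Int) + -60000).toNat = 1 by decide,
      if_pos (by omega : (1:Nat) ≤ 2)]
  rfl

theorem solution_tight : Claim_exact_solution := by
  intro n _ _ hd
  have halt : solution_alt n = 0 := by
    rcases hd with rfl | rfl <;> norm_num [solution_alt]
  rcases hd with rfl | rfl
  · rw [solution_neg (-60000) (by norm_num) (by norm_num), halt,
        show ((60001 : Int) + -60000).toNat = 1 by decide,
        if_pos (by omega : (1:Nat) ≤ 2)]
    decide
  · rw [solution_neg (-59999) (by norm_num) (by norm_num), halt,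
        show ((60001 : Int) + -59999).toNat = 2 by decide,
        if_pos (by omega : (2:Nat) ≤ 2)]
    decide
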